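-- pv_equiv track=rewrite | github.com/Saytor20/PyNucleus-Model | src/pynucleus/eval/validation_manager.py | _determine_consensus_status
-- ===== SOURCE A (Python) =====
-- from typing import Dict, List, Any, Optional, Set, Tuple
--
-- def _determine_consensus_status(statuses: List[str]) -> str:
--     """Determine consensus status from multiple validations."""
--     if not statuses:
--         return "not_validated"
--
--     # Count status occurrences
--     status_counts = {}
--     for status in statuses:
--         status_counts[status] = status_counts.get(status, 0) + 1
--
--     # Find most common status
--     max_count = max(status_counts.values())
--     consensus_statuses = [s for s, c in status_counts.items() if c == max_count]
--
--     if len(consensus_statuses) == 1: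
--         return consensus_statuses[0]
--     else:
--         return "conflicting_validations"
-- ===== SOURCE B (Python) =====
-- def _determine_consensus_status(statuses):
--     """Determine consensus status from multiple validations (sort-then-scan)."""
--     if not statuses:
--         return "not_validated"
--     ordered = sorted(statuses)
--     n = len(ordered)
--     best_len = 0
--     best_status = ""
--     n_best = 0
--     i = 0
--     while i < n:
--         j = i
--         while j < n and ordered[j] == ordered[i]:
--             j += 1
--         run = j - i
--         if run > best_len:
--             best_len, best_status, n_best = run, ordered[i], 1
--         elif run == best_len:
--             n_best += 1
--         i = j
--     return best_status if n_best == 1 else "conflicting_validations"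
-- ===== Notes on version B (the rewrite author's own statement) =====
-- stated objective: alternative
-- what changed: Replaces dict-based counting and a max-over-values pass with sort-then-scan: sort the statuses, walk adjacent equal runs once, tracking the longest run, its status and how many statuses attain it.
import Mathlib
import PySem

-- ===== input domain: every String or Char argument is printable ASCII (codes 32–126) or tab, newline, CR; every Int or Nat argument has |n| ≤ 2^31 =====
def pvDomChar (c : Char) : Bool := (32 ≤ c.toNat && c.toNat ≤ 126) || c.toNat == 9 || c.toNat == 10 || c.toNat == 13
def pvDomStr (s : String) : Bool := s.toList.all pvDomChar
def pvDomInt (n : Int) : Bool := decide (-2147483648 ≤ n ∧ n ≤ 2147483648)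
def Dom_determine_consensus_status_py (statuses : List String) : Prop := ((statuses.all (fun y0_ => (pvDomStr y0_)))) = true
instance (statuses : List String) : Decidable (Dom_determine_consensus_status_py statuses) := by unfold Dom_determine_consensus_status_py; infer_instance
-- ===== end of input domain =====

-- B replaces A's dict counting with a sort-then-scan over adjacent equal runs (alternative algorithm, same results).

-- ===== PORT A =====
def determine_consensus_status_py (statuses : List String) : String :=
  if statuses = [] then "not_validated"
  else
    let status_counts : PySem.Dict String Int :=
      statuses.foldl (fun d s => d.insert s (d.getD s 0 + 1)) PySem.Dict.empty
    -- max(status_counts.values()): the dict is nonempty here, so the getD 0 fallback is unreachable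
    let max_count : Int := (PySem.List.max? status_counts.values (fun v => v)).getD 0
    let consensus := (status_counts.items.filter (fun p => p.2 == max_count)).map Prod.fst
    -- consensus[0]: taken only when consensus.length = 1, so headD's fallback is unreachable
    if consensus.length = 1 then consensus.headD "" else "conflicting_validations"

-- ===== PORT B =====
-- state = (best_len, best_status, n_best), updated once per run, as in Source B's loop body
def pvStep (st : Int × String × Int) (status : String) (run : Int) : Int × String × Int :=
  if run > st.1 then (run, status, 1)
  else if run == st.1 then (st.1, st.2.1, st.2.2 + 1)
  else st

-- Source B's outer while loop: the inner while finds the end of the run starting at i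
def pvScan (l : List String) (st : Int × String × Int) : Int × String × Int :=
  match l with
  | [] => st
  | x :: t =>
      let run : Int := ((t.takeWhile (fun y => y == x)).length : Int) + 1
      pvScan (t.dropWhile (fun y => y == x)) (pvStep st x run)
termination_by l.length
decreasing_by simpa using Nat.lt_succ_of_le (List.length_dropWhile_le _ _)

def determine_consensus_status_py_alt (statuses : List String) : String :=
  if statuses = [] then "not_validated"
  else
    let st := pvScan (PySem.List.sorted statuses (fun x => x) false) (0, "", 0)
    if st.2.2 == 1 then st.2.1 else "conflicting_validations"

-- ===== PRECONDITION & SPEC =====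
def Spec_determine_consensus_status_py (statuses : List String) (out : String) : Prop := out = determine_consensus_status_py_alt statuses
instance (statuses : List String) (out : String) : Decidable (Spec_determine_consensus_status_py statuses out) := by unfold Spec_determine_consensus_status_py; infer_instance

-- ===== CLAIM (what is proved, stated in full; the proofs are below) =====
def Claim_equal_determine_consensus_status_py : Prop := ∀ (statuses : List String), Dom_determine_consensus_status_py statuses → Spec_determine_consensus_status_py statuses (determine_consensus_status_py statuses)

-- ===== LEMMAS AND PROOFS =====

-- The common abstract result: max count, the statuses attaining it, the verdict
def pvM (ps : List (String × Int)) : Int := (ps.map Prod.snd).foldl max 0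
def pvW (ps : List (String × Int)) : List (String × Int) := ps.filter (fun p => p.2 == pvM ps)
def pvF (ps : List (String × Int)) : String :=
  if (pvW ps).length = 1 then ((pvW ps).headD ("", 0)).1 else "conflicting_validations"
-- key/count pairs of a list, keys in first-occurrence order
def pvKC (l : List String) : List (String × Int) :=
  (PySem.Set.ofList l).map (fun k => (k, (List.count k l : Int)))

theorem pvM_append (ps : List (String × Int)) (p : String × Int) :
    pvM (ps ++ [p]) = max (pvM ps) p.2 := by
  simp [pvM]

theorem pv_le_pvM (ps : List (String × Int)) {q : String × Int} (hq : q ∈ ps) : q.2 ≤ pvM ps := by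
  have : q.2 ∈ ps.map Prod.snd := List.mem_map_of_mem hq
  unfold pvM
  exact (PySem.List.le_foldl_max (ps.map Prod.snd) 0).2 q.2 this

theorem pv_foldl_max_mem : ∀ (l : List Int) (a : Int), l.foldl max a = a ∨ l.foldl max a ∈ l := by
  intro l
  induction l with
  | nil => intro a; left; rfl
  | cons x t ih =>
      intro a
      rcases ih (max a x) with h | h
      · rcases le_total a x with hax | hxa
        · right; rw [List.foldl_cons, h, max_eq_right hax]; exact List.mem_cons_self
        · left; rw [List.foldl_cons, h, max_eq_left hxa]
      · right; exact List.mem_cons_of_mem _ h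

theorem pvM_attained (ps : List (String × Int)) (hne : ps ≠ [])
    (hpos : ∀ p ∈ ps, 0 < p.2) : ∃ q ∈ ps, q.2 = pvM ps := by
  rcases pv_foldl_max_mem (ps.map Prod.snd) 0 with h | h
  · exfalso
    rcases List.exists_mem_of_ne_nil ps hne with ⟨p, hp⟩
    have h1 := pv_le_pvM ps hp
    have h2 := hpos p hp
    rw [pvM] at h1; rw [h] at h1; omega
  · rcases List.mem_map.mp h with ⟨q, hq, hq2⟩
    exact ⟨q, hq, hq2⟩

-- B's fold over the key/count pairs computes (max, first winner, number of winners)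
theorem pv_fold_spec (ps : List (String × Int)) (hpos : ∀ p ∈ ps, 0 < p.2) :
    ps.foldl (fun st p => pvStep st p.1 p.2) (0, "", 0) =
      (pvM ps, ((pvW ps).headD ("", 0)).1, ((pvW ps).length : Int)) := by
  induction ps using List.reverseRecOn with
  | nil => simp [pvM, pvW]
  | append_singleton qs p ih =>
      have hpos' : ∀ q ∈ qs, 0 < q.2 := fun q hq => hpos q (by simp [hq])
      have hp : 0 < p.2 := hpos p (by simp)
      rw [List.foldl_append, List.foldl_cons, List.foldl_nil, ih hpos']
      have hM := pvM_append qs p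
      rcases lt_trichotomy (pvM qs) p.2 with hlt | heq | hgt
      · -- new strict max: the filter over qs is empty
        have hMnew : pvM (qs ++ [p]) = p.2 := by rw [hM]; omega
        have hWq : qs.filter (fun q => q.2 == pvM (qs ++ [p])) = [] := by
          rw [List.filter_eq_nil_iff]
          intro q hq
          have := pv_le_pvM qs hq
          simp only [beq_iff_eq]
          omega
        have hW : pvW (qs ++ [p]) = [p] := by
          unfold pvW
          rw [List.filter_append, hWq]
          simp [hMnew]
        rw [pvStep]
        simp only [hW, hMnew]
        simp [hlt]
      · -- tie with the old max: one more winner, first winner unchanged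
        have hMnew : pvM (qs ++ [p]) = pvM qs := by rw [hM]; omega
        have hW : pvW (qs ++ [p]) = pvW qs ++ [p] := by
          unfold pvW
          rw [List.filter_append, hMnew]
          simp [heq]
        have hqs : qs ≠ [] := by
          rintro rfl
          simp [pvM] at heq; omega
        rcases pvM_attained qs hqs hpos' with ⟨q, hq, hq2⟩
        have hWq_ne : pvW qs ≠ [] := by
          intro h
          have : q ∈ pvW qs := by
            unfold pvW
            rw [List.mem_filter]
            exact ⟨hq, by simp [hq2]⟩
          rw [h] at this; simp at this
        rw [pvStep]
        simp only [hW]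
        rcases List.exists_cons_of_ne_nil hWq_ne with ⟨w, ws, hws⟩
        simp [hws, heq, hMnew]
      · -- below the max: nothing changes
        have hMnew : pvM (qs ++ [p]) = pvM qs := by rw [hM]; omega
        have hW : pvW (qs ++ [p]) = pvW qs := by
          unfold pvW
          rw [List.filter_append, hMnew]
          have : p.2 ≠ pvM qs := by omega
          simp [this]
        rw [pvStep]
        simp only [hW, hMnew]
        have h1 : ¬ p.2 > pvM qs := by omega
        have h2 : ¬ p.2 = pvM qs := by omega
        simp [h1, h2]

-- the verdict depends on the key/count pairs only up to permutation
theorem pvF_perm {ps qs : List (String × Int)} (h : ps.Perm qs) : pvF ps = pvF qs := by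
  have hM : pvM ps = pvM qs := by
    unfold pvM
    exact (h.map Prod.snd).foldl_eq 0
  have hW : (pvW ps).Perm (pvW qs) := by
    unfold pvW
    rw [hM]
    exact h.filter _
  unfold pvF
  rw [hW.length_eq]
  by_cases hlen : (pvW qs).length = 1
  · rcases List.length_eq_one_iff.mp hlen with ⟨a, ha⟩
    rw [ha] at hW
    rw [List.perm_singleton.mp hW, ha]
  · simp [hlen]

theorem pv_discard_of_not_mem {s : List String} {x : String} (h : x ∉ s) :
    PySem.Set.discard s x = s := by
  rw [PySem.Set.discard, List.filter_eq_self]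
  intro a ha
  simp only [Bool.not_eq_eq_eq_not, Bool.not_true, beq_eq_false_iff_ne, ne_eq]
  rintro rfl; exact h ha

theorem pv_ofList_drop_run {x : String} {post : List String} (hx : x ∉ post) :
    ∀ pre : List String, (∀ y ∈ pre, y = x) →
      PySem.Set.discard (PySem.Set.ofList (pre ++ post)) x = PySem.Set.ofList post := by
  intro pre
  induction pre with
  | nil =>
      intro _
      exact pv_discard_of_not_mem (by rw [PySem.Set.mem_ofList]; exact hx)
  | cons y pre' ih =>
      intro hall
      have hy : y = x := hall y (by simp)
      subst hy
      rw [List.cons_append, PySem.Set.ofList_cons]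
      have h1 : PySem.Set.discard (y :: PySem.Set.discard (PySem.Set.ofList (pre' ++ post)) y) y
          = PySem.Set.discard (PySem.Set.discard (PySem.Set.ofList (pre' ++ post)) y) y := by
        simp [PySem.Set.discard]
      have h2 : PySem.Set.discard (PySem.Set.discard (PySem.Set.ofList (pre' ++ post)) y) y
          = PySem.Set.discard (PySem.Set.ofList (pre' ++ post)) y := by
        simp [PySem.Set.discard, List.filter_filter]
      rw [h1, h2]
      exact ih (fun z hz => hall z (by simp [hz]))

theorem pv_not_mem_dropWhile {x : String} {t : List String}
    (hpw : List.Pairwise (fun a b => a ≤ b) t) (hle : ∀ z ∈ t, x ≤ z) :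
    x ∉ t.dropWhile (fun y => y == x) := by
  intro hmem
  cases hpost : t.dropWhile (fun y => y == x) with
  | nil => rw [hpost] at hmem; simp at hmem
  | cons y post' =>
      have hsub : (y :: post').Sublist t := by
        rw [← hpost]; exact List.dropWhile_sublist _
      have hy : ((y == x) : Bool) = false := by
        have h := List.head?_dropWhile_not (fun y => y == x) t
        rw [hpost] at h
        simpa using h
      have hyx : y ≠ x := by simpa using hy
      have hxy : x ≤ y := hle y (hsub.mem (by simp))
      have hxlty : x < y := lt_of_le_of_ne hxy (fun h => hyx h.symm)
      rw [hpost] at hmem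
      rcases List.mem_cons.mp hmem with h | h
      · exact hyx h.symm
      · have hpw' : List.Pairwise (fun a b => a ≤ b) (y :: post') := hpw.sublist hsub
        have hyle : y ≤ x := (List.pairwise_cons.mp hpw').1 x h
        exact absurd (lt_of_lt_of_le hxlty hyle) (lt_irrefl x)

-- B's scan over a sorted list is the fold of pvStep over that list's key/count pairs
theorem pv_scan_eq (l : List String) (hpw : List.Pairwise (fun a b => a ≤ b) l)
    (st : Int × String × Int) :
    pvScan l st = (pvKC l).foldl (fun st p => pvStep st p.1 p.2) st := by
  match l with
  | [] => simp [pvScan, pvKC]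
  | x :: t =>
      have hpwt : List.Pairwise (fun a b => a ≤ b) t := (List.pairwise_cons.mp hpw).2
      have hle : ∀ z ∈ t, x ≤ z := (List.pairwise_cons.mp hpw).1
      set pre := t.takeWhile (fun y => y == x) with hpre
      set post := t.dropWhile (fun y => y == x) with hpostdef
      have hall : ∀ y ∈ pre, y = x := by
        intro y hy
        have := List.mem_takeWhile_imp hy
        simpa using this
      have hxpost : x ∉ post := pv_not_mem_dropWhile hpwt hle
      have hpwpost : List.Pairwise (fun a b => a ≤ b) post :=
        hpw.sublist ((List.dropWhile_sublist _).cons _)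
      have hsplit : pre ++ post = t := List.takeWhile_append_dropWhile
      -- the head run is exactly all occurrences of x
      have hcount : List.count x (x :: t) = pre.length + 1 := by
        rw [List.count_cons_self, ← hsplit, List.count_append]
        have hc1 : List.count x pre = pre.length :=
          List.count_eq_length.mpr (fun b hb => (hall b hb).symm)
        have hc2 : List.count x post = 0 := List.count_eq_zero.mpr hxpost
        omega
      -- the distinct keys: x followed by the keys of the rest
      have hkeys : PySem.Set.ofList (x :: t) = x :: PySem.Set.ofList post := by
        rw [PySem.Set.ofList_cons, ← hsplit, pv_ofList_drop_run hxpost _ hall]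
      -- counts of the remaining keys are unchanged by removing the head run
      have hcongr : ∀ k ∈ PySem.Set.ofList post,
          List.count k (x :: t) = List.count k post := by
        intro k hk
        have hkpost : k ∈ post := (PySem.Set.mem_ofList _ _).mp hk
        have hkx : k ≠ x := fun h => hxpost (h ▸ hkpost)
        rw [List.count_cons_of_ne (fun h => hkx h.symm), ← hsplit, List.count_append]
        have : List.count k pre = 0 :=
          List.count_eq_zero.mpr (fun hmem => hkx (hall k hmem))
        omega
      have htail : List.map (fun k => (k, (List.count k (x :: t) : Int))) (PySem.Set.ofList post)
          = pvKC post := by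
        unfold pvKC
        exact List.map_congr_left (fun k hk => by rw [hcongr k hk])
      have hKC : pvKC (x :: t) = (x, (pre.length : Int) + 1) :: pvKC post := by
        unfold pvKC
        rw [hkeys, List.map_cons, hcount, htail]
        norm_cast
      rw [pvScan, hKC, List.foldl_cons]
      exact pv_scan_eq post hpwpost _
termination_by l.length
decreasing_by simpa using Nat.lt_succ_of_le (List.length_dropWhile_le _ _)

-- every key/count pair has a positive count
theorem pvKC_pos (l : List String) : ∀ p ∈ pvKC l, 0 < p.2 := by
  intro p hp
  rcases List.mem_map.mp hp with ⟨k, hk, rfl⟩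
  have : k ∈ l := (PySem.Set.mem_ofList _ _).mp hk
  have : 0 < List.count k l := List.count_pos_iff.mpr this
  simpa using this

theorem pv_max_getD (vs : List Int) (hne : vs ≠ []) (hnn : ∀ v ∈ vs, 0 ≤ v) :
    (PySem.List.max? vs (fun v => v)).getD 0 = vs.foldl max 0 := by
  match vs with
  | [] => exact absurd rfl hne
  | v :: t =>
      rw [PySem.List.max?_id_cons, Option.getD_some, List.foldl_cons,
        max_eq_right (hnn v (by simp))]

-- A's port computes the abstract verdict on the key/count pairs of statuses
theorem pv_A_eq (statuses : List String) (h : statuses ≠ []) :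
    determine_consensus_status_py statuses = pvF (pvKC statuses) := by
  unfold determine_consensus_status_py
  rw [if_neg h]
  simp only [PySem.Dict.foldl_insert_getD_add_one_eq_counter]
  have hvals : (PySem.Dict.counter statuses).values = (pvKC statuses).map Prod.snd := by
    rw [PySem.Dict.values, PySem.Dict.items_counter, pvKC, List.map_map]
  have hitems : (PySem.Dict.counter statuses).items = pvKC statuses := by
    rw [PySem.Dict.items_counter, pvKC]
  have hKCne : pvKC statuses ≠ [] := by
    unfold pvKC
    rcases List.exists_mem_of_ne_nil statuses h with ⟨s, hs⟩
    have : s ∈ PySem.Set.ofList statuses := (PySem.Set.mem_ofList _ _).mpr hs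
    intro hnil
    rw [List.map_eq_nil_iff] at hnil
    rw [hnil] at this
    simp at this
  have hvne : (pvKC statuses).map Prod.snd ≠ [] := by
    simpa using hKCne
  have hnn : ∀ v ∈ (pvKC statuses).map Prod.snd, 0 ≤ v := by
    intro v hv
    rcases List.mem_map.mp hv with ⟨p, hp, rfl⟩
    exact le_of_lt (pvKC_pos statuses p hp)
  rw [hvals, hitems, pv_max_getD _ hvne hnn]
  have hmax : ((pvKC statuses).map Prod.snd).foldl max 0 = pvM (pvKC statuses) := rfl
  rw [hmax]
  have hw : (pvKC statuses).filter (fun p => p.2 == pvM (pvKC statuses)) = pvW (pvKC statuses) := rfl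
  rw [hw]
  unfold pvF
  rw [List.length_map]
  by_cases hlen : (pvW (pvKC statuses)).length = 1
  · rcases List.length_eq_one_iff.mp hlen with ⟨a, ha⟩
    simp [ha]
  · simp [hlen]

-- B's port computes the abstract verdict on the key/count pairs of the sorted list
theorem pv_B_eq (statuses : List String) (h : statuses ≠ []) :
    determine_consensus_status_py_alt statuses =
      pvF (pvKC (PySem.List.sorted statuses (fun x => x) false)) := by
  unfold determine_consensus_status_py_alt
  rw [if_neg h]
  have hpw : List.Pairwise (fun a b => a ≤ b) (PySem.List.sorted statuses (fun x => x) false) :=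
    PySem.List.sorted_pairwise statuses (fun x => x)
  rw [pv_scan_eq _ hpw, pv_fold_spec _ (pvKC_pos _)]
  unfold pvF
  by_cases hlen : (pvW (pvKC (PySem.List.sorted statuses (fun x => x) false))).length = 1
  · simp [hlen]
  · have : (((pvW (pvKC (PySem.List.sorted statuses (fun x => x) false))).length : Int) == 1) = false := by
      simp only [beq_eq_false_iff_ne, ne_eq]
      intro hc
      exact hlen (by exact_mod_cast hc)
    simp [this, hlen]

-- sorting permutes the statuses, hence permutes the key/count pairs
theorem pvKC_sorted_perm (statuses : List String) :
    (pvKC (PySem.List.sorted statuses (fun x => x) false)).Perm (pvKC statuses) := by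
  have hperm : (PySem.List.sorted statuses (fun x => x) false).Perm statuses :=
    PySem.List.sorted_perm statuses (fun x => x) false
  have hcnt : pvKC (PySem.List.sorted statuses (fun x => x) false) =
      (PySem.Set.ofList (PySem.List.sorted statuses (fun x => x) false)).map
        (fun k => (k, (List.count k statuses : Int))) := by
    unfold pvKC
    exact List.map_congr_left (fun k _ => by rw [hperm.count_eq])
  rw [hcnt]
  unfold pvKC
  apply List.Perm.map
  rw [List.perm_ext_iff_of_nodup (PySem.Set.nodup_ofList _) (PySem.Set.nodup_ofList _)]
  intro a
  rw [PySem.Set.mem_ofList, PySem.Set.mem_ofList, hperm.mem_iff]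

-- ===== VERDICT (by name: the statement is the Claim_ definition above) =====
theorem determine_consensus_status_py_spec : Claim_equal_determine_consensus_status_py := by
  intro statuses _
  unfold Spec_determine_consensus_status_py
  by_cases h : statuses = []
  · subst h; rfl
  · rw [pv_A_eq statuses h, pv_B_eq statuses h, pvF_perm (pvKC_sorted_perm statuses)]
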